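-- pv_equiv track=rewrite | github.com/Yorkin1998/KompLingvistika | main/tests.py | split_suffixes
-- ===== SOURCE A (Python) =====
-- SUFFIXES = [
--     "lar",
--     "im",
--     "ing",
--     "i",
--     "si",
--     "miz",
--     "ngiz",
--     "ni",
--     "ga",
--     "qa",
--     "da",
--     "ta",
--     "dan",
--     "tan",
--     "ning",
--     "ningdan",
--     "di",
--     "dim",
--     "ding",
--     "dik",
--     "gan",
--     "man",
--     "yapti",
--     "yapman",
--     "yapsan",
--     "yapmiz",
--     "yapsiz",
--     "adi",
--     "arman",
--     "arsan",
--     "adi",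
--     "ajak",
--     "man",
--     "san",
--     "miz",
--     "siz",
--     "lar",
--     "ma",
--     "mas",
--     "may",
--     "masa",
--     "gin",
--     "ing",
--     "sin",
--     "aylik",
--     "chi",
--     "lik",
--     "kor",
--     "dor",
--     "li",
--     "siz",
--     "ona",
--     "vchi"
-- ]
--
-- def split_suffixes(word, root):
--     """Qo'shimchalarni bosqichma-bosqich ajratish"""
--     suffixes_found = []
--     remaining = word[len(root):]
--     while remaining:
--         matched = False
--         for suf in sorted(SUFFIXES, key=lambda x: -len(x)):
--             if remaining.startswith(suf):
--                 suffixes_found.append(suf)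
--                 remaining = remaining[len(suf):]
--                 matched = True
--                 break
--         if not matched:
--             break
--     return suffixes_found
-- ===== SOURCE B (Python) =====
-- # B: builds a trie (prefix tree) over SUFFIXES once; each step walks the trie
-- # character-by-character to find the longest matching suffix, instead of
-- # re-sorting SUFFIXES and scanning them with startswith on every iteration.
-- SUFFIXES = [
--     "lar", "im", "ing", "i", "si", "miz", "ngiz", "ni", "ga", "qa", "da",
--     "ta", "dan", "tan", "ning", "ningdan", "di", "dim", "ding", "dik",
--     "gan", "man", "yapti", "yapman", "yapsan", "yapmiz", "yapsiz", "adi",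
--     "arman", "arsan", "adi", "ajak", "man", "san", "miz", "siz", "lar",
--     "ma", "mas", "may", "masa", "gin", "ing", "sin", "aylik", "chi",
--     "lik", "kor", "dor", "li", "siz", "ona", "vchi"
-- ]
--
-- def _build_trie(words):
--     # flat trie: node = [terminal, {char: child-index}]
--     nodes = [[False, {}]]
--     for w in words:
--         cur = 0
--         for ch in w:
--             nxt = nodes[cur][1].get(ch)
--             if nxt is None:
--                 nodes.append([False, {}])
--                 nxt = len(nodes) - 1
--                 nodes[cur][1][ch] = nxt
--             cur = nxt
--         nodes[cur][0] = True
--     return nodes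
--
-- TRIE = _build_trie(SUFFIXES)
--
-- def _longest(remaining):
--     # length of the longest suffix in the trie that prefixes `remaining` (0 if none)
--     cur, best, depth = 0, 0, 0
--     for ch in remaining:
--         nxt = TRIE[cur][1].get(ch)
--         if nxt is None:
--             break
--         cur = nxt
--         depth += 1
--         if TRIE[cur][0]:
--             best = depth
--     return best
--
-- def split_suffixes(word, root):
--     suffixes_found = []
--     remaining = word[len(root):]
--     while remaining:
--         best = _longest(remaining)
--         if best == 0:
--             break
--         suffixes_found.append(remaining[:best])
--         remaining = remaining[best:]
--     return suffixes_found
-- ===== Notes on version B (the rewrite author's own statement) =====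
-- stated objective: alternative
-- what changed: B builds a trie (prefix tree) over SUFFIXES once and finds each longest matching suffix by a single character-by-character walk of the trie, instead of re-sorting SUFFIXES by length and scanning the sorted list with startswith on every loop iteration.
import Mathlib
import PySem

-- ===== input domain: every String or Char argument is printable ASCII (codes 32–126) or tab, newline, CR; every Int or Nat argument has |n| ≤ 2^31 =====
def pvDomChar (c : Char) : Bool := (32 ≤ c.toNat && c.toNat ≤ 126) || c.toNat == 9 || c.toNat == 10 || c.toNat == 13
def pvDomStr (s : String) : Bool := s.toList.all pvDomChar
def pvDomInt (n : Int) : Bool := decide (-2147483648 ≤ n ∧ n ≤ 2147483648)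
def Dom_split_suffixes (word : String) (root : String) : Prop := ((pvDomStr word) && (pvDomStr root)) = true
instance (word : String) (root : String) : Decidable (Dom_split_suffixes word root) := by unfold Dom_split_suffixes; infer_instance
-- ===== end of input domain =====

set_option maxRecDepth 10000


-- B replaces A's per-iteration re-sort-and-scan of SUFFIXES by a trie (prefix tree) built
-- once and walked character-by-character for each longest match; objective: alternative algorithm.

def SUFFIXES : List String := [
  "lar", "im", "ing", "i", "si", "miz", "ngiz", "ni", "ga", "qa", "da",
  "ta", "dan", "tan", "ning", "ningdan", "di", "dim", "ding", "dik",
  "gan", "man", "yapti", "yapman", "yapsan", "yapmiz", "yapsiz", "adi",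
  "arman", "arsan", "adi", "ajak", "man", "san", "miz", "siz", "lar",
  "ma", "mas", "may", "masa", "gin", "ing", "sin", "aylik", "chi",
  "lik", "kor", "dor", "li", "siz", "ona", "vchi"]

-- ===== PORT A =====
-- the inner 'for suf in sorted(SUFFIXES, key=lambda x: -len(x)): if remaining.startswith(suf): … break'
def aFind : List String → List Char → Option String
  | [], _ => none
  | s :: ss, rem => if PySem.Chars.startswith rem s.toList then some s else aFind ss rem

-- the 'while remaining:' loop; fuel = |remaining| suffices since every matched suffix is nonempty
def aLoop : Nat → List Char → List String → List String
  | 0, _, acc => acc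
  | fuel+1, rem, acc =>
    if rem = [] then acc
    else
      match aFind (PySem.List.sorted SUFFIXES (fun x => -((PySem.Str.len x : Int))) false) rem with
      | some s => aLoop fuel (rem.drop s.toList.length) (acc ++ [s])
      | none => acc

def split_suffixes (word : String) (root : String) : List String :=
  aLoop (PySem.Str.len word).toNat
    (PySem.List.slice word.toList (some ((PySem.Str.len root : Int))) none) []

-- ===== PORT B =====
-- flat trie: node = (terminal, children dict char → node index); indices are nonneg by
-- construction, so Python's nodes[cur] / nodes.append / nodes[cur][1][ch] = … become
-- getD / ++ [·] / set at cur (always in range).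
def trieInsert (nodes : List (Bool × PySem.Dict Char Int)) (w : List Char) :
    List (Bool × PySem.Dict Char Int) :=
  let st := w.foldl (fun (st : List (Bool × PySem.Dict Char Int) × Nat) ch =>
    let nodes := st.1
    let cur := st.2
    let nd := nodes.getD cur (false, PySem.Dict.empty)
    match nd.2.get? ch with
    | some nxt => (nodes, nxt.toNat)
    | none =>
      let nodes' := nodes ++ [(false, PySem.Dict.empty)]
      let nxt := nodes'.length - 1
      (nodes'.set cur (nd.1, nd.2.insert ch (nxt : Int)), nxt)) (nodes, 0)
  let nd := st.1.getD st.2 (false, PySem.Dict.empty)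
  st.1.set st.2 (true, nd.2)

def trieNodes : List (Bool × PySem.Dict Char Int) :=
  SUFFIXES.foldl (fun nodes w => trieInsert nodes w.toList) [(false, PySem.Dict.empty)]

def nodeAt (i : Nat) : Bool × PySem.Dict Char Int := trieNodes.getD i (false, PySem.Dict.empty)

-- '_longest': walk the trie along remaining, remembering the deepest terminal depth
def longestAux : List Char → Nat → Nat → Nat → Nat
  | [], _, best, _ => best
  | ch :: rest, cur, best, depth =>
    match (nodeAt cur).2.get? ch with
    | none => best
    | some nxt =>
      longestAux rest nxt.toNat (if (nodeAt nxt.toNat).1 then depth + 1 else best) (depth + 1)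

-- the 'while remaining:' loop of B; fuel = |remaining| suffices since best ≥ 1 when taken
def bLoop : Nat → List Char → List String → List String
  | 0, _, acc => acc
  | fuel+1, rem, acc =>
    if rem = [] then acc
    else
      let best := longestAux rem 0 0 0
      if best = 0 then acc
      else bLoop fuel (rem.drop best) (acc ++ [String.ofList (rem.take best)])

def split_suffixes_alt (word : String) (root : String) : List String :=
  bLoop (PySem.Str.len word).toNat
    (PySem.List.slice word.toList (some ((PySem.Str.len root : Int))) none) []

-- ===== PRECONDITION & SPEC =====
def Spec_split_suffixes (word : String) (root : String) (out : List String) : Prop := out = split_suffixes_alt word root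
instance (word : String) (root : String) (out : List String) : Decidable (Spec_split_suffixes word root out) := by unfold Spec_split_suffixes; infer_instance

-- ===== CLAIM (what is proved, stated in full; the proofs are below) =====
def Claim_equal_split_suffixes : Prop := ∀ (word : String) (root : String), Dom_split_suffixes word root → Spec_split_suffixes word root (split_suffixes word root)

-- ===== LEMMAS AND PROOFS =====

-- ---- A-side: aFind finds the longest suffix that prefixes rem ----

theorem suffixes_len (s : String) (hs : s ∈ SUFFIXES) :
    1 ≤ s.toList.length ∧ s.toList.length ≤ 7 := by
  fin_cases hs <;> decide

theorem aFind_none_iff (ss : List String) (rem : List Char) :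
    aFind ss rem = none ↔ ∀ s ∈ ss, ¬ s.toList <+: rem := by
  induction ss with
  | nil => simp [aFind]
  | cons s t ih =>
    simp only [aFind]
    by_cases h : PySem.Chars.startswith rem s.toList
    · simp [h, (PySem.Chars.startswith_iff _ _).mp h]
    · have h' : ¬ s.toList <+: rem := fun hp => h ((PySem.Chars.startswith_iff _ _).mpr hp)
      simp [h, h', ih]

theorem aFind_some (ss : List String) (rem : List Char) (s : String)
    (hsort : ss.Pairwise (fun a b => b.toList.length ≤ a.toList.length))
    (h : aFind ss rem = some s) :
    s ∈ ss ∧ s.toList <+: rem ∧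
      ∀ t ∈ ss, t.toList <+: rem → t.toList.length ≤ s.toList.length := by
  induction ss with
  | nil => simp [aFind] at h
  | cons a t ih =>
    rw [List.pairwise_cons] at hsort
    simp only [aFind] at h
    by_cases ha : PySem.Chars.startswith rem a.toList
    · simp only [ha, if_true, Option.some.injEq] at h
      subst h
      refine ⟨List.mem_cons_self, (PySem.Chars.startswith_iff _ _).mp ha, ?_⟩
      intro u hu _
      rcases List.mem_cons.mp hu with h1 | h2
      · simp [h1]
      · exact hsort.1 u h2
    · simp only [ha] at h
      simp only [Bool.false_eq_true, if_false] at h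
      obtain ⟨hm, hp, hmax⟩ := ih hsort.2 h
      refine ⟨List.mem_cons_of_mem _ hm, hp, ?_⟩
      intro u hu hpre
      rcases List.mem_cons.mp hu with h1 | h2
      · exact absurd ((PySem.Chars.startswith_iff _ _).mpr (h1 ▸ hpre)) ha
      · exact hmax u h2 hpre

theorem sorted_pairwise_len :
    (PySem.List.sorted SUFFIXES (fun x => -((PySem.Str.len x : Int))) false).Pairwise
      (fun a b => b.toList.length ≤ a.toList.length) := by
  have h := PySem.List.sorted_pairwise SUFFIXES (fun x => -((PySem.Str.len x : Int)))
  refine h.imp ?_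
  intro a b hab
  simp only [PySem.Str.len_eq] at hab
  omega

theorem mem_sorted_suffixes (s : String) :
    s ∈ PySem.List.sorted SUFFIXES (fun x => -((PySem.Str.len x : Int))) false ↔ s ∈ SUFFIXES :=
  PySem.List.mem_sorted _ _ _ _

-- ---- B-side: the language of a trie node, by fuel ----

def lang : Nat → Nat → List (List Char)
  | 0, n => if (nodeAt n).1 then [[]] else []
  | f+1, n => (if (nodeAt n).1 then [[]] else []) ++
      ((nodeAt n).2.items.flatMap (fun p => (lang f p.2.toNat).map (p.1 :: ·)))

theorem nodup_nodeAt (n : Nat) : (nodeAt n).2.keys.Nodup := by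
  unfold nodeAt
  by_cases h : n < trieNodes.length
  · rw [List.getD_eq_getElem _ _ h]
    have hmem : trieNodes[n] ∈ trieNodes := List.getElem_mem h
    revert hmem
    generalize trieNodes[n] = nd
    revert nd
    decide
  · rw [List.getD_eq_default _ _ (by omega)]
    decide

theorem nil_mem_lang (f n : Nat) : [] ∈ lang f n ↔ (nodeAt n).1 = true := by
  cases f <;> by_cases h : (nodeAt n).1 <;> simp [lang, h]

theorem cons_mem_lang (f n : Nat) (c : Char) (t : List Char) :
    c :: t ∈ lang (f+1) n ↔ ∃ m, (nodeAt n).2.get? c = some m ∧ t ∈ lang f m.toNat := by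
  simp only [lang, List.mem_append, List.mem_flatMap, List.mem_map]
  constructor
  · rintro (h | ⟨p, hp, t', ht', heq⟩)
    · split at h <;> simp_all
    · obtain ⟨hc, hteq⟩ : p.1 = c ∧ t' = t := by
        constructor <;> [exact (List.cons.injEq _ _ _ _ ▸ heq).1; exact (List.cons.injEq _ _ _ _ ▸ heq).2]
      refine ⟨p.2, ?_, hteq ▸ ht'⟩
      have := PySem.Dict.get?_of_mem_items (d := (nodeAt n).2) (k := p.1) (v := p.2)
        (by simpa using hp) (nodup_nodeAt n)
      rwa [hc] at this
  · rintro ⟨m, hget, ht⟩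
    right
    exact ⟨(c, m), by simpa using PySem.Dict.mem_items_of_get?_eq_some _ hget, t, ht, rfl⟩

theorem lang_len_le (f : Nat) : ∀ n t, t ∈ lang f n → t.length ≤ f := by
  induction f with
  | zero => intro n t h; simp only [lang] at h; split at h <;> simp_all
  | succ f ih =>
    intro n t h
    cases t with
    | nil => simp
    | cons c cs =>
      obtain ⟨m, _, hcs⟩ := (cons_mem_lang f n c cs).mp h
      have := ih m.toNat cs hcs
      simpa using Nat.succ_le_succ this

theorem mem_lang_of_le (t : List Char) : ∀ f n, t.length ≤ f →
    (t ∈ lang f n ↔ t ∈ lang t.length n) := by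
  induction t with
  | nil => intro f n _; cases f <;> simp [nil_mem_lang]
  | cons c cs ih =>
    intro f n hf
    cases f with
    | zero => simp at hf
    | succ f =>
      rw [cons_mem_lang, show (c :: cs).length = cs.length + 1 from rfl, cons_mem_lang]
      constructor
      · rintro ⟨m, hg, hm⟩
        exact ⟨m, hg, (ih f m.toNat (by simpa using hf)).mp hm⟩
      · rintro ⟨m, hg, hm⟩
        exact ⟨m, hg, (ih f m.toNat (by simpa using hf)).mpr ((ih cs.length m.toNat le_rfl).mp hm)⟩

-- the trie has depth ≤ 7, so lang stabilizes at fuel 7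
theorem lang_default (f : Nat) (n : Nat) (h : trieNodes.length ≤ n) : lang f n = [] := by
  have hnode : nodeAt n = (false, PySem.Dict.empty) := by
    unfold nodeAt; rw [List.getD_eq_default _ _ h]
  cases f <;> simp [lang, hnode, PySem.Dict.empty]

theorem lang_stab_base : ∀ n, lang 8 n = lang 7 n := by
  intro n
  by_cases h : n < trieNodes.length
  · revert h
    have : ∀ n' < trieNodes.length, lang 8 n' = lang 7 n' := by decide
    exact this n
  · rw [lang_default _ _ (by omega), lang_default _ _ (by omega)]

theorem lang_stab_step (f : Nat) (h : ∀ n, lang (f+1) n = lang f n) :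
    ∀ n, lang (f+2) n = lang (f+1) n := by
  intro n
  conv_lhs => rw [lang]
  conv_rhs => rw [lang]
  congr 1
  apply List.flatMap_congr
  intro p _
  rw [h p.2.toNat]

theorem lang_stab_all : ∀ k n, lang (8 + k) n = lang (7 + k) n := by
  intro k
  induction k with
  | zero => exact lang_stab_base
  | succ k ih =>
    have h := lang_stab_step (7 + k) (fun n => by
      rw [show 7 + k + 1 = 8 + k by omega]; exact ih n)
    intro n
    rw [show 8 + (k + 1) = 7 + k + 2 by omega, show 7 + (k + 1) = 7 + k + 1 by omega]
    exact h n

theorem lang_ge_seven (f : Nat) (hf : 7 ≤ f) : ∀ n, lang f n = lang 7 n := by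
  obtain ⟨k, rfl⟩ : ∃ k, f = 7 + k := ⟨f - 7, by omega⟩
  clear hf
  induction k with
  | zero => intro n; rfl
  | succ k ih =>
    intro n
    rw [show 7 + (k + 1) = 8 + k by omega, lang_stab_all k n]
    exact ih n

theorem lang7_len (t : List Char) (h : t ∈ lang 7 0) : t.length ≤ 7 :=
  lang_len_le 7 0 t h

-- the root's language is exactly SUFFIXES
theorem mem_lang_iff_suffix (cs : List Char) :
    cs ∈ lang cs.length 0 ↔ String.ofList cs ∈ SUFFIXES := by
  constructor
  · intro h
    by_cases hl : cs.length ≤ 7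
    · have h7 : cs ∈ lang 7 0 := (mem_lang_of_le cs 7 0 hl).mpr h
      revert h7
      have : ∀ l ∈ lang 7 0, String.ofList l ∈ SUFFIXES := by decide
      exact this cs
    · exfalso
      have := lang_ge_seven cs.length (by omega) 0
      rw [this] at h
      exact hl (lang7_len cs h)
  · intro h
    have h1 : ∀ s ∈ SUFFIXES, s.toList ∈ lang 7 0 := by decide
    have h2 : cs ∈ lang 7 0 := by
      have := h1 _ h
      rwa [String.toList_ofList] at this
    exact (mem_lang_of_le cs 7 0 (lang7_len cs h2)).mp h2

-- ---- the walker computes the longest match against lang ----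

def bestN : Nat → List Char → Nat
  | _, [] => 0
  | n, c :: cs =>
    match (nodeAt n).2.get? c with
    | none => 0
    | some m =>
      let b := bestN m.toNat cs
      if b ≠ 0 then b + 1 else if (nodeAt m.toNat).1 then 1 else 0

theorem walk_eq_bestN : ∀ (rem : List Char) (cur best depth : Nat),
    longestAux rem cur best depth =
      if bestN cur rem = 0 then best else depth + bestN cur rem := by
  intro rem
  induction rem with
  | nil => intro cur best depth; simp [longestAux, bestN]
  | cons c cs ih =>
    intro cur best depth
    simp only [longestAux, bestN]
    cases hg : (nodeAt cur).2.get? c with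
    | none => simp
    | some m =>
      dsimp only
      rw [ih]
      by_cases hb : bestN m.toNat cs = 0
      · by_cases ht : (nodeAt m.toNat).1 <;> simp [hb, ht]
      · simp only [hb, ne_eq, not_false_iff, if_true]
        simp
        omega

theorem bestN_spec : ∀ (rem : List Char) (n : Nat),
    bestN n rem ≤ rem.length ∧
    (bestN n rem ≠ 0 → rem.take (bestN n rem) ∈ lang (bestN n rem) n) ∧
    (∀ L, bestN n rem < L → L ≤ rem.length → rem.take L ∉ lang L n) := by
  intro rem
  induction rem with
  | nil =>
    intro n
    refine ⟨by simp [bestN], by simp [bestN], ?_⟩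
    intro L h1 h2
    simp [bestN] at h1
    simp at h2
    omega
  | cons c cs ih =>
    intro n
    simp only [bestN]
    cases hg : (nodeAt n).2.get? c with
    | none =>
      refine ⟨by simp, by simp, ?_⟩
      intro L h1 _ hmem
      obtain ⟨L', rfl⟩ : ∃ L', L = L' + 1 := ⟨L - 1, by omega⟩
      rw [List.take_succ_cons] at hmem
      obtain ⟨m, hgm, _⟩ := (cons_mem_lang L' n c _).mp hmem
      simp [hg] at hgm
    | some m =>
      obtain ⟨ih1, ih2, ih3⟩ := ih m.toNat
      by_cases hb : bestN m.toNat cs = 0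
      · by_cases ht : (nodeAt m.toNat).1
        · -- bestN = 1
          simp only [hb, ne_eq, not_true_eq_false, if_false, ht, if_true]
          refine ⟨by simp, ?_, ?_⟩
          · intro _
            rw [List.take_succ_cons, List.take_zero]
            exact (cons_mem_lang 0 n c []).mpr ⟨m, hg, (nil_mem_lang 0 m.toNat).mpr ht⟩
          · intro L h1 h2 hmem
            obtain ⟨L', rfl⟩ : ∃ L', L = L' + 1 := ⟨L - 1, by omega⟩
            rw [List.take_succ_cons] at hmem
            obtain ⟨m', hgm, hmem'⟩ := (cons_mem_lang L' n c _).mp hmem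
            rw [hg] at hgm
            obtain rfl : m = m' := by simpa using hgm
            exact ih3 L' (by omega) (by simpa using h2) hmem'
        · -- bestN = 0
          simp only [hb, ne_eq, not_true_eq_false, if_false, ht, if_false]
          refine ⟨by simp, by simp, ?_⟩
          intro L h1 h2 hmem
          obtain ⟨L', rfl⟩ : ∃ L', L = L' + 1 := ⟨L - 1, by omega⟩
          rw [List.take_succ_cons] at hmem
          obtain ⟨m', hgm, hmem'⟩ := (cons_mem_lang L' n c _).mp hmem
          rw [hg] at hgm
          obtain rfl : m = m' := by simpa using hgm
          cases Nat.eq_zero_or_pos L' with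
          | inl h0 =>
            subst h0
            rw [List.take_zero] at hmem'
            exact ht ((nil_mem_lang 0 m.toNat).mp hmem')
          | inr hpos => exact ih3 L' (by omega) (by simpa using h2) hmem'
      · -- bestN = b + 1
        simp only [hb, ne_eq, not_false_iff, if_true]
        refine ⟨by simpa using Nat.succ_le_succ ih1, ?_, ?_⟩
        · intro _
          rw [List.take_succ_cons]
          exact (cons_mem_lang _ n c _).mpr ⟨m, hg, ih2 hb⟩
        · intro L h1 h2 hmem
          obtain ⟨L', rfl⟩ : ∃ L', L = L' + 1 := ⟨L - 1, by omega⟩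
          rw [List.take_succ_cons] at hmem
          obtain ⟨m', hgm, hmem'⟩ := (cons_mem_lang L' n c _).mp hmem
          rw [hg] at hgm
          obtain rfl : m = m' := by simpa using hgm
          exact ih3 L' (by omega) (by simpa using h2) hmem'

-- ---- the two inner searches agree ----

theorem step_eq (rem : List Char) :
    (aFind (PySem.List.sorted SUFFIXES (fun x => -((PySem.Str.len x : Int))) false) rem = none
      ∧ bestN 0 rem = 0) ∨
    (∃ s, aFind (PySem.List.sorted SUFFIXES (fun x => -((PySem.Str.len x : Int))) false) rem = some s
      ∧ bestN 0 rem = s.toList.length ∧ rem.take (bestN 0 rem) = s.toList) := by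
  obtain ⟨hle, hmem, hmax⟩ := bestN_spec rem 0
  cases hA : aFind (PySem.List.sorted SUFFIXES (fun x => -((PySem.Str.len x : Int))) false) rem with
  | none =>
    left
    refine ⟨rfl, ?_⟩
    by_contra hb
    have h1 := hmem hb
    have h2 : String.ofList (rem.take (bestN 0 rem)) ∈ SUFFIXES := by
      have := (mem_lang_iff_suffix (rem.take (bestN 0 rem)))
      rw [List.length_take, Nat.min_eq_left hle] at this
      exact this.mp h1
    have hpre : (String.ofList (rem.take (bestN 0 rem))).toList <+: rem := by
      rw [String.toList_ofList]; exact List.take_prefix _ _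
    exact (aFind_none_iff _ rem).mp hA _ ((mem_sorted_suffixes _).mpr h2) hpre
  | some s =>
    right
    obtain ⟨hsm, hpre, hbig⟩ := aFind_some _ rem s sorted_pairwise_len hA
    have hsmem : s ∈ SUFFIXES := (mem_sorted_suffixes s).mp hsm
    obtain ⟨hs1, _⟩ := suffixes_len s hsmem
    have hslen : s.toList.length ≤ rem.length := hpre.length_le
    have htake : rem.take s.toList.length = s.toList := (List.prefix_iff_eq_take.mp hpre).symm
    have hlang : rem.take s.toList.length ∈ lang s.toList.length 0 := by
      have : String.ofList (rem.take s.toList.length) ∈ SUFFIXES := by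
        rw [htake, String.ofList_toList]; exact hsmem
      have h := (mem_lang_iff_suffix (rem.take s.toList.length))
      rw [List.length_take, Nat.min_eq_left hslen] at h
      exact h.mpr this
    have hge : s.toList.length ≤ bestN 0 rem := by
      by_contra hlt
      exact hmax s.toList.length (by omega) hslen hlang
    have hlt : ¬ s.toList.length < bestN 0 rem := by
      intro hlt
      have hb : bestN 0 rem ≠ 0 := by omega
      have h1 := hmem hb
      have h2 : String.ofList (rem.take (bestN 0 rem)) ∈ SUFFIXES := by
        have := (mem_lang_iff_suffix (rem.take (bestN 0 rem)))
        rw [List.length_take, Nat.min_eq_left hle] at this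
        exact this.mp h1
      have hpre2 : (String.ofList (rem.take (bestN 0 rem))).toList <+: rem := by
        rw [String.toList_ofList]; exact List.take_prefix _ _
      have := hbig _ ((mem_sorted_suffixes _).mpr h2) hpre2
      rw [String.toList_ofList, List.length_take, Nat.min_eq_left hle] at this
      omega
    have heq : bestN 0 rem = s.toList.length := by omega
    exact ⟨s, rfl, heq, heq ▸ htake⟩

-- ---- the two while-loops agree ----

theorem loop_eq (fuel : Nat) : ∀ (rem : List Char) (acc : List String),
    aLoop fuel rem acc = bLoop fuel rem acc := by
  induction fuel with
  | zero => intro rem acc; rfl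
  | succ n ih =>
    intro rem acc
    simp only [aLoop, bLoop]
    by_cases hrem : rem = []
    · simp [hrem]
    · simp only [hrem, if_false]
      rw [walk_eq_bestN]
      rcases step_eq rem with ⟨hA, hB⟩ | ⟨s, hA, hB, htake⟩
      · rw [hA, hB]
        simp
      · have hsmem := (aFind_some _ rem s sorted_pairwise_len hA).1
        have hs1 := (suffixes_len s ((mem_sorted_suffixes s).mp hsmem)).1
        have hbz : ¬ bestN 0 rem = 0 := by omega
        rw [hA]
        simp only [if_neg hbz, Nat.zero_add]
        rw [hB] at htake
        rw [hB, htake, String.ofList_toList]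
        exact ih _ _

-- ===== VERDICT (by name: the statement is the Claim_ definition above) =====
theorem split_suffixes_spec : Claim_equal_split_suffixes := by
  intro word root _
  unfold Spec_split_suffixes split_suffixes split_suffixes_alt
  exact loop_eq _ _ _
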